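-- pv_equiv track=rewrite | github.com/smullins7/advent-of-code | 2021/day_22.py | part_one
-- ===== SOURCE A (Python) =====
-- import itertools
--
-- def _range(inclusive_list):
--     min_v, max_v = inclusive_list[0], inclusive_list[1]
--     return range(max(min_v, -50), min(max_v, 50) + 1)
--
-- def part_one(data):
--     sparse_points = {}
--     for (is_on, ranges) in data:
--         if len([item for sublist in ranges for item in sublist if -50 <= item <= 50]) != 6:
--             continue
--         x_r, y_r, z_r = ranges
--         for x, y, z in itertools.product(_range(x_r), _range(y_r), _range(z_r)):
--             sparse_points[(x, y, z)] = is_on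
--     return sum(sparse_points.values())
-- ===== SOURCE B (Python) =====
-- def part_one(data):
--     cuboids = [(is_on, ranges) for is_on, ranges in data
--                if len([item for sublist in ranges for item in sublist if -50 <= item <= 50]) == 6]
--     total = 0
--     for x in range(-50, 51):
--         cx = [(is_on, y_r, z_r) for is_on, (x_r, y_r, z_r) in cuboids
--               if x_r[0] <= x <= x_r[1]]
--         for y in range(-50, 51):
--             cxy = [(is_on, z_r) for is_on, y_r, z_r in cx if y_r[0] <= y <= y_r[1]]
--             for z in range(-50, 51):
--                 state = None
--                 for is_on, z_r in cxy:
--                     if z_r[0] <= z <= z_r[1]: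
--                         state = is_on
--                 total += 1 if state else 0
--     return total
-- ===== Notes on version B (the rewrite author's own statement) =====
-- stated objective: alternative
-- what changed: A paints every unit cube of each clamped cuboid into a dict keyed by (x,y,z) and sums its values; B never builds a point dict: it sweeps the [-50,50]^3 grid point-major, narrowing the cuboid list per x and per y and keeping only the last cuboid state per point.
-- outside the precondition, e.g. on part_one([(True, [[1, 2], [3, 4], [5, 6], [700, 800]])]): A raises ValueError, B raises ValueError; on part_one([(True, [[-100, 2, 3], [1], [3, 4, 5]])]): A raises IndexError, B raises IndexError
import Mathlib
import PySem

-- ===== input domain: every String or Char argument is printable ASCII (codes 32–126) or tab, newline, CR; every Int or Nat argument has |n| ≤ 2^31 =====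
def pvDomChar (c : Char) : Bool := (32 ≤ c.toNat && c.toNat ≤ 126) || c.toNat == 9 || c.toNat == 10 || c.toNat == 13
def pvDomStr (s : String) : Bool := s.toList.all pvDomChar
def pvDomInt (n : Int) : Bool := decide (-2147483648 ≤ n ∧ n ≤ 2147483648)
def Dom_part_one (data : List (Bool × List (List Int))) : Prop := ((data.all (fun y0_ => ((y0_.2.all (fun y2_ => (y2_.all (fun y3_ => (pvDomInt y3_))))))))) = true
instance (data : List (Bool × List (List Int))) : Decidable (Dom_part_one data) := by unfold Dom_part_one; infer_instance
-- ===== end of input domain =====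

-- B replaces A's dict of unit cubes (written cuboid-by-cuboid) by a point-major sweep of the
-- [-50,50]³ grid that keeps, per point, only the last cuboid state — an alternative algorithm
-- of similar cost (no dict), not claimed faster.

-- ===== PORT A =====
-- helper `_range` of A: range(max(lo,-50), min(hi,50)+1)
def pvRangeA (l : List Int) : List Int :=
  PySem.List.pyRange (max (PySem.List.pyGetD l 0 0) (-50)) (min (PySem.List.pyGetD l 1 0) 50 + 1) 1

-- the flattened count of in-range items (A's validity test; B's Python repeats the same expression)
def pvFlatCount (ranges : List (List Int)) : Nat :=
  (ranges.flatMap (fun sub => sub.filter (fun item => decide (-50 ≤ item ∧ item ≤ 50)))).length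

-- itertools.product of three lists, as the list of triples in product order
def pvProd3 (as bs cs : List Int) : List (Int × Int × Int) :=
  as.flatMap (fun x => bs.flatMap (fun y => cs.map (fun z => (x, y, z))))

def part_one (data : List (Bool × List (List Int))) : Int :=
  let d : PySem.Dict (Int × Int × Int) Bool :=
    data.foldl (fun d p =>
      if pvFlatCount p.2 ≠ 6 then d
      else
        (pvProd3 (pvRangeA (PySem.List.pyGetD p.2 0 []))
                 (pvRangeA (PySem.List.pyGetD p.2 1 []))
                 (pvRangeA (PySem.List.pyGetD p.2 2 []))).foldl
          (fun d q => d.insert q p.1) d) PySem.Dict.empty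
  (d.values.map (fun b => if b then (1 : Int) else 0)).sum

-- ===== PORT B =====
-- r[0] <= v <= r[1]
def pvHit (r : List Int) (v : Int) : Bool :=
  decide (PySem.List.pyGetD r 0 0 ≤ v) && decide (v ≤ PySem.List.pyGetD r 1 0)

def part_one_alt (data : List (Bool × List (List Int))) : Int :=
  let cuboids := data.filter (fun p => pvFlatCount p.2 == 6)
  (PySem.List.pyRange (-50) 51 1).foldl (fun total x =>
    let cx := (cuboids.filter (fun p => pvHit (PySem.List.pyGetD p.2 0 []) x)).map
      (fun p => (p.1, (PySem.List.pyGetD p.2 1 [], PySem.List.pyGetD p.2 2 [])))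
    (PySem.List.pyRange (-50) 51 1).foldl (fun total y =>
      let cxy := (cx.filter (fun q => pvHit q.2.1 y)).map (fun q => (q.1, q.2.2))
      (PySem.List.pyRange (-50) 51 1).foldl (fun total z =>
        let state := cxy.foldl (fun st q => if pvHit q.2 z then some q.1 else st)
          (none : Option Bool)
        total + (if state = some true then 1 else 0)) total) total) 0

-- ===== PRECONDITION & SPEC =====
-- Pre_ excludes only inputs on which Python A raises: a cuboid passing the count-6 test whose
-- `ranges` is not exactly three sublists (ValueError on unpacking) or has a sublist of length < 2
-- (IndexError in `_range`).
def Pre_part_one (data : List (Bool × List (List Int))) : Prop :=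
  ∀ p ∈ data, pvFlatCount p.2 = 6 → p.2.length = 3 ∧ ∀ r ∈ p.2, 2 ≤ r.length
instance (data : List (Bool × List (List Int))) : Decidable (Pre_part_one data) := by
  unfold Pre_part_one; infer_instance

def pvWitness_part_one : (List (Bool × List (List Int))) :=
  [(true, [[0, 1], [0, 1], [0, 1]]), (false, [[0, 0], [0, 0], [0, 0]])]

def Spec_part_one (data : List (Bool × List (List Int))) (out : Int) : Prop := out = part_one_alt data
instance (data : List (Bool × List (List Int))) (out : Int) : Decidable (Spec_part_one data out) := by
  unfold Spec_part_one; infer_instance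

-- ===== CLAIM (what is proved, stated in full; the proofs are below) =====
def Claim_equal_part_one : Prop := ∀ (data : List (Bool × List (List Int))), Dom_part_one data → Pre_part_one data → Spec_part_one data (part_one data)

-- ===== LEMMAS AND PROOFS =====

-- the common "last write wins" state of a point, as a fold over the cuboid list
def pvLast (hit : (Bool × List (List Int)) → Bool) (cubs : List (Bool × List (List Int))) :
    Option Bool :=
  cubs.foldl (fun st p => if hit p then some p.1 else st) none

-- A-side hit test of one axis: v ∈ pvRangeA r
def pvHitA (r : List Int) (v : Int) : Bool :=
  decide (max (PySem.List.pyGetD r 0 0) (-50) ≤ v ∧ v < min (PySem.List.pyGetD r 1 0) 50 + 1)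

lemma mem_pvRangeA (r : List Int) (v : Int) : v ∈ pvRangeA r ↔ pvHitA r v = true := by
  simp [pvRangeA, pvHitA, PySem.List.mem_pyRange_one]

lemma pvHitA_eq_pvHit (r : List Int) (v : Int) (h1 : -50 ≤ v) (h2 : v ≤ 50) :
    pvHitA r v = pvHit r v := by
  simp only [pvHitA, pvHit]
  rw [Bool.eq_iff_iff, Bool.and_eq_true, decide_eq_true_eq, decide_eq_true_eq, decide_eq_true_eq]
  omega

lemma mem_pvProd3 (as bs cs : List Int) (q : Int × Int × Int) :
    q ∈ pvProd3 as bs cs ↔ q.1 ∈ as ∧ q.2.1 ∈ bs ∧ q.2.2 ∈ cs := by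
  obtain ⟨x, y, z⟩ := q
  simp [pvProd3]

lemma pvProd3_eq_product (as bs cs : List Int) : pvProd3 as bs cs = as ×ˢ (bs ×ˢ cs) := by
  simp only [pvProd3, SProd.sprod, List.product, List.map_flatMap, List.map_map]
  rfl

lemma get?_foldl_insert_const (L : List (Int × Int × Int)) (v : Bool)
    (d : PySem.Dict (Int × Int × Int) Bool) (k : Int × Int × Int) :
    (L.foldl (fun d q => d.insert q v) d).get? k = if k ∈ L then some v else d.get? k := by
  induction L generalizing d with
  | nil => simp
  | cons a L ih =>
    simp only [List.foldl_cons, ih, PySem.Dict.get?_insert, List.mem_cons]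
    by_cases h1 : k ∈ L <;> by_cases h2 : k = a <;> simp [h1, h2]

def pvStepA (d : PySem.Dict (Int × Int × Int) Bool) (p : Bool × List (List Int)) :
    PySem.Dict (Int × Int × Int) Bool :=
  if pvFlatCount p.2 ≠ 6 then d
  else
    (pvProd3 (pvRangeA (PySem.List.pyGetD p.2 0 []))
             (pvRangeA (PySem.List.pyGetD p.2 1 []))
             (pvRangeA (PySem.List.pyGetD p.2 2 []))).foldl
      (fun d q => d.insert q p.1) d

def pvHitsA (p : Bool × List (List Int)) (x y z : Int) : Bool :=
  pvHitA (PySem.List.pyGetD p.2 0 []) x && pvHitA (PySem.List.pyGetD p.2 1 []) y &&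
    pvHitA (PySem.List.pyGetD p.2 2 []) z

lemma get?_pvStepA (d : PySem.Dict (Int × Int × Int) Bool) (p : Bool × List (List Int))
    (x y z : Int) :
    (pvStepA d p).get? (x, y, z) =
      if pvFlatCount p.2 = 6 && pvHitsA p x y z then some p.1 else d.get? (x, y, z) := by
  by_cases hv : pvFlatCount p.2 = 6
  · simp only [pvStepA, hv, ne_eq, not_true_eq_false, if_false, get?_foldl_insert_const,
      mem_pvProd3, mem_pvRangeA, pvHitsA]
    by_cases hx : pvHitA (PySem.List.pyGetD p.2 0 []) x = true <;>
      by_cases hy : pvHitA (PySem.List.pyGetD p.2 1 []) y = true <;>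
      by_cases hz : pvHitA (PySem.List.pyGetD p.2 2 []) z = true <;>
      simp [hx, hy, hz]
  · simp [pvStepA, hv]

lemma A_dict_char (cubs : List (Bool × List (List Int)))
    (d : PySem.Dict (Int × Int × Int) Bool) (x y z : Int) :
    (cubs.foldl pvStepA d).get? (x, y, z) =
      cubs.foldl (fun st p => if pvFlatCount p.2 = 6 && pvHitsA p x y z then some p.1 else st)
        (d.get? (x, y, z)) := by
  induction cubs generalizing d with
  | nil => simp
  | cons a l ih => simp only [List.foldl_cons, ih, get?_pvStepA]

lemma keys_nodup_foldl_stepA (cubs : List (Bool × List (List Int)))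
    (d : PySem.Dict (Int × Int × Int) Bool) (h : d.keys.Nodup) :
    (cubs.foldl pvStepA d).keys.Nodup := by
  induction cubs generalizing d with
  | nil => exact h
  | cons a l ih =>
    refine ih _ ?_
    by_cases hv : pvFlatCount a.2 = 6
    · simp only [pvStepA, hv, ne_eq, not_true_eq_false, if_false]
      exact PySem.Dict.nodup_keys_foldl_insert _ _ _ h
    · simpa [pvStepA, hv] using h

def pvGrid3 : List (Int × Int × Int) :=
  pvProd3 (PySem.List.pyRange (-50) 51 1) (PySem.List.pyRange (-50) 51 1)
    (PySem.List.pyRange (-50) 51 1)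

lemma mem_pvGrid3 (q : Int × Int × Int) :
    q ∈ pvGrid3 ↔ (-50 ≤ q.1 ∧ q.1 < 51) ∧ (-50 ≤ q.2.1 ∧ q.2.1 < 51) ∧
      (-50 ≤ q.2.2 ∧ q.2.2 < 51) := by
  rw [pvGrid3, mem_pvProd3]
  simp [PySem.List.mem_pyRange_one]

lemma keys_sub_grid_foldl_stepA (cubs : List (Bool × List (List Int)))
    (d : PySem.Dict (Int × Int × Int) Bool) (h : ∀ k ∈ d.keys, k ∈ pvGrid3) :
    ∀ k ∈ (cubs.foldl pvStepA d).keys, k ∈ pvGrid3 := by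
  induction cubs generalizing d with
  | nil => exact h
  | cons a l ih =>
    refine ih _ ?_
    intro k hk
    by_cases hv : pvFlatCount a.2 = 6
    · simp only [pvStepA, hv, ne_eq, not_true_eq_false, if_false,
        PySem.Dict.keys_foldl_insert, PySem.Set.update_eq_append_filter,
        List.mem_append, List.mem_filter, PySem.Set.mem_ofList] at hk
      rcases hk with hk | ⟨hk, -⟩
      · exact h _ hk
      · rw [mem_pvProd3] at hk
        rw [mem_pvRangeA] at hk
        rw [mem_pvRangeA] at hk
        rw [mem_pvRangeA] at hk
        obtain ⟨h1, h2, h3⟩ := hk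
        simp only [pvHitA, decide_eq_true_eq] at h1 h2 h3
        rw [mem_pvGrid3]
        omega
    · simp only [pvStepA, hv, ne_eq, not_false_eq_true, if_true] at hk
      exact h _ hk

lemma nodup_pvGrid3 : pvGrid3.Nodup := by
  rw [pvGrid3, pvProd3_eq_product]
  exact List.Nodup.product (PySem.List.nodup_pyRange_one _ _)
    (List.Nodup.product (PySem.List.nodup_pyRange_one _ _) (PySem.List.nodup_pyRange_one _ _))

-- sum of the dict's boolean values = 0/1 indicator sum over any nodup superset of the keys
lemma sum_values_eq_sum_grid (d : PySem.Dict (Int × Int × Int) Bool)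
    (hnd : d.keys.Nodup) (hsub : ∀ k ∈ d.keys, k ∈ pvGrid3) :
    (d.values.map (fun b => if b then (1 : Int) else 0)).sum =
      (pvGrid3.map (fun q => if d.get? q = some true then (1 : Int) else 0)).sum := by
  have hL : (d.values.map (fun b => if b then (1 : Int) else 0)).sum =
      ((d.items.filter (fun e => e.2)).map Prod.fst).length := by
    rw [show (fun (b : Bool) => if b then (1 : Int) else 0) =
      (fun b => if (fun x : Bool => x) b = true then (1 : Int) else 0) from by funext b; simp,
      PySem.List.sum_map_ite_one_zero]
    simp [PySem.Dict.values, List.countP_eq_length_filter, List.filter_map,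
      Function.comp_def]
  have hR : (pvGrid3.map (fun q => if d.get? q = some true then (1 : Int) else 0)).sum =
      (pvGrid3.filter (fun q => d.get? q == some true)).length := by
    rw [show (fun (q : Int × Int × Int) => if d.get? q = some true then (1 : Int) else 0) =
      (fun q => if (fun q => d.get? q == some true) q = true then (1 : Int) else 0) from by
        funext q; simp, PySem.List.sum_map_ite_one_zero]
    simp [List.countP_eq_length_filter]
  rw [hL, hR]
  have hmem : ∀ q, q ∈ (d.items.filter (fun e => e.2)).map Prod.fst ↔ d.get? q = some true := by
    intro q
    simp only [List.mem_map, List.mem_filter]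
    constructor
    · rintro ⟨⟨k, v⟩, ⟨hin, hv⟩, rfl⟩
      subst hv
      exact (PySem.Dict.get?_eq_some_iff_mem_items d k true hnd).2 hin
    · intro hget
      exact ⟨(q, true), ⟨(PySem.Dict.get?_eq_some_iff_mem_items d q true hnd).1 hget,
        by simp⟩, rfl⟩
  have hperm : List.Perm ((d.items.filter (fun e => e.2)).map Prod.fst)
      (pvGrid3.filter (fun q => d.get? q == some true)) := by
    refine (List.perm_ext_iff_of_nodup ?_ ?_).2 ?_
    · exact hnd.sublist (List.Sublist.map Prod.fst List.filter_sublist)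
    · exact nodup_pvGrid3.filter _
    · intro q
      rw [hmem q]
      simp only [List.mem_filter, beq_iff_eq]
      constructor
      · intro hget
        refine ⟨?_, hget⟩
        exact hsub q (PySem.Dict.mem_keys_of_mem_items d
          ((PySem.Dict.get?_eq_some_iff_mem_items d q true hnd).1 hget))
      · exact fun h => h.2
  exact_mod_cast hperm.length_eq

lemma foldl_add_eq_sum (l : List Int) (f : Int → Int) (init : Int) :
    l.foldl (fun acc x => acc + f x) init = init + (l.map f).sum := by
  induction l generalizing init with
  | nil => simp
  | cons a l ih => simp [ih, add_assoc]

def pvLastB (data : List (Bool × List (List Int))) (x y z : Int) : Option Bool :=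
  data.foldl (fun st p =>
    if (pvFlatCount p.2 == 6) && pvHit (PySem.List.pyGetD p.2 0 []) x &&
        pvHit (PySem.List.pyGetD p.2 1 []) y && pvHit (PySem.List.pyGetD p.2 2 []) z then
      some p.1
    else st) none

lemma B_eq_sum (data : List (Bool × List (List Int))) :
    part_one_alt data =
      ((PySem.List.pyRange (-50) 51 1).map (fun x =>
        ((PySem.List.pyRange (-50) 51 1).map (fun y =>
          ((PySem.List.pyRange (-50) 51 1).map (fun z =>
            if pvLastB data x y z = some true then (1 : Int) else 0)).sum)).sum)).sum := by
  unfold part_one_alt pvLastB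
  simp only [List.foldl_map, List.foldl_filter, foldl_add_eq_sum, zero_add]
  refine congrArg List.sum (List.map_congr_left fun x hx => ?_)
  refine congrArg List.sum (List.map_congr_left fun y hy => ?_)
  refine congrArg List.sum (List.map_congr_left fun z hz => ?_)
  refine congrArg (fun o : Option Bool => if o = some true then (1 : Int) else 0) ?_
  refine PySem.List.foldl_congr_mem _ _ _ _ ?_
  intro st p hp
  by_cases h1 : pvFlatCount p.2 == 6 <;>
    by_cases h2 : pvHit (PySem.List.pyGetD p.2 0 []) x <;>
    by_cases h3 : pvHit (PySem.List.pyGetD p.2 1 []) y <;>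
    by_cases h4 : pvHit (PySem.List.pyGetD p.2 2 []) z <;>
    simp [h1, h2, h3, h4]

lemma sum_pvGrid3 (F : Int × Int × Int → Int) :
    (pvGrid3.map F).sum =
      ((PySem.List.pyRange (-50) 51 1).map (fun x =>
        ((PySem.List.pyRange (-50) 51 1).map (fun y =>
          ((PySem.List.pyRange (-50) 51 1).map (fun z => F (x, y, z))).sum)).sum)).sum := by
  simp [pvGrid3, pvProd3, List.map_map, List.flatMap_def, List.sum_flatten,
    Function.comp_def]

-- ===== VERDICT (by name: the statement is the Claim_ definition above) =====
theorem part_one_spec : Claim_equal_part_one := by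
  intro data hdom hpre
  show part_one data = part_one_alt data
  have hA : part_one data =
      (pvGrid3.map (fun q =>
        if (data.foldl pvStepA PySem.Dict.empty).get? q = some true then (1 : Int) else 0)).sum := by
    exact sum_values_eq_sum_grid _
      (keys_nodup_foldl_stepA data _ PySem.Dict.nodup_keys_empty)
      (keys_sub_grid_foldl_stepA data _ (by simp [PySem.Dict.keys_empty]))
  rw [hA, B_eq_sum, sum_pvGrid3]
  refine congrArg List.sum (List.map_congr_left fun x hx => ?_)
  refine congrArg List.sum (List.map_congr_left fun y hy => ?_)
  refine congrArg List.sum (List.map_congr_left fun z hz => ?_)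
  refine congrArg (fun o : Option Bool => if o = some true then (1 : Int) else 0) ?_
  rw [A_dict_char, PySem.Dict.get?_empty]
  rw [PySem.List.mem_pyRange_one] at hx hy hz
  unfold pvLastB
  refine PySem.List.foldl_congr_mem _ _ _ _ ?_
  intro st p hp
  rw [pvHitsA,
    pvHitA_eq_pvHit _ _ hx.1 (by omega),
    pvHitA_eq_pvHit _ _ hy.1 (by omega),
    pvHitA_eq_pvHit _ _ hz.1 (by omega)]
  by_cases h1 : pvFlatCount p.2 = 6 <;>
    simp [h1]
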